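-- pv_equiv track=rewrite | github.com/mubeakungu/Netguardian-ai | database.py | detect_os_simple
-- ===== SOURCE A (Python) =====
-- def detect_os_simple(ip, nmap_results):
--     """Simple OS detection based on open ports."""
--     if ip not in nmap_results:
--         return "Unknown"
--
--     try:
--         if 'tcp' in nmap_results[ip]:
--             open_ports = [port for port, info in nmap_results[ip]['tcp'].items() if info['state'] == 'open']
--
--             if 135 in open_ports or 445 in open_ports or 3389 in open_ports:
--                 return "Windows"
--             if 22 in open_ports:
--                 return "Linux/Unix"
--             if 23 in open_ports:
--                 return "Network Device"
--     except KeyError: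
--         return "Unknown"
--
--     return "Unknown"
-- ===== SOURCE B (Python) =====
-- def detect_os_simple(ip, nmap_results):
--     """OS detection: rank each open port by specificity, index a table by the minimum rank."""
--     host = nmap_results.get(ip)
--     if host is None or 'tcp' not in host:
--         return "Unknown"
--     RANK = {135: 0, 445: 0, 3389: 0, 22: 1, 23: 2}
--     try:
--         ranks = [RANK.get(port, 3) for port, info in host['tcp'].items() if info['state'] == 'open']
--     except KeyError:
--         return "Unknown"
--     return ("Windows", "Linux/Unix", "Network Device", "Unknown")[min(ranks, default=3)]
-- ===== Notes on version B (the rewrite author's own statement) =====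
-- stated objective: alternative
-- what changed: Replaces A's build-the-open-port-list-then-three-membership-scans-and-early-return-chain by a rank reduction: each open port is mapped through a priority table (windows ports 0, ssh 1, telnet 2, other 3), and the result is a tuple indexed by the minimum rank (default 3), with no branching on specific ports at the end.
import Mathlib
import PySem

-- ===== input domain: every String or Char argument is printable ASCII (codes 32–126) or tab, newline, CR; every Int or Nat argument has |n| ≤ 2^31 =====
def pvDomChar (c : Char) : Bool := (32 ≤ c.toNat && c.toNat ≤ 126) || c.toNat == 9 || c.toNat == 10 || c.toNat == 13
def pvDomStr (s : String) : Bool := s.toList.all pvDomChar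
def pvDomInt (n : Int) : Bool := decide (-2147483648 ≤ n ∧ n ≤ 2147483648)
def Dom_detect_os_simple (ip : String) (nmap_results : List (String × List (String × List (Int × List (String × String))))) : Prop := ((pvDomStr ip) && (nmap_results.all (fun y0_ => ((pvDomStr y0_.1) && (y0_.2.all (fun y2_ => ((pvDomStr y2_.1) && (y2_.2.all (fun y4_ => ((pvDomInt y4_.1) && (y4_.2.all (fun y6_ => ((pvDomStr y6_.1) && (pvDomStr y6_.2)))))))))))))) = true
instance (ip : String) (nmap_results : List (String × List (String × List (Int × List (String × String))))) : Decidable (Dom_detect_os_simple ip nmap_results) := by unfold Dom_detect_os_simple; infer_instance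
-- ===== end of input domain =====

-- B ranks each open port (windows ports 0, ssh 1, telnet 2, other 3) and indexes a result table
-- by the minimum rank, instead of A's open-port list plus three membership scans (objective: alternative).
-- ===== PORT A =====
-- list comprehension [port for port, info in ….items() if info['state'] == 'open'];
-- none = a KeyError (some info lacks 'state'), caught by A's except
def openPortsA : List (Int × List (String × String)) → Option (List Int)
  | [] => some []
  | (p, info) :: rest =>
    match info.lookup "state" with
    | none => none
    | some s =>
      match openPortsA rest with
      | none => none
      | some ports => some (if s == "open" then p :: ports else ports)

def detect_os_simple (ip : String) (nmap_results : List (String × List (String × List (Int × List (String × String))))) : String :=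
  match nmap_results.lookup ip with
  | none => "Unknown"
  | some host =>
    match host.lookup "tcp" with
    | none => "Unknown"
    | some tcp =>
      match openPortsA tcp with
      | none => "Unknown"          -- except KeyError: return "Unknown"
      | some open_ports =>
        if open_ports.contains 135 || open_ports.contains 445 || open_ports.contains 3389 then "Windows"
        else if open_ports.contains 22 then "Linux/Unix"
        else if open_ports.contains 23 then "Network Device"
        else "Unknown"

-- ===== PORT B =====
-- RANK = {135: 0, 445: 0, 3389: 0, 22: 1, 23: 2}; RANK.get(port, 3)
def rankTableB : List (Int × Nat) := [(135, 0), (445, 0), (3389, 0), (22, 1), (23, 2)]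

def rankOfB (p : Int) : Nat := (rankTableB.lookup p).getD 3

-- ranks = [RANK.get(port, 3) for port, info in ….items() if info['state'] == 'open'];
-- none = a KeyError (some info lacks 'state'), caught by B's except
def ranksB : List (Int × List (String × String)) → Option (List Nat)
  | [] => some []
  | (p, info) :: rest =>
    match info.lookup "state" with
    | none => none
    | some s =>
      match ranksB rest with
      | none => none
      | some rs => some (if s == "open" then rankOfB p :: rs else rs)

-- min(ranks, default=3)
def pyMinD3 : List Nat → Nat
  | [] => 3
  | r :: rs => rs.foldl min r

def osTableB : List String := ["Windows", "Linux/Unix", "Network Device", "Unknown"]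

def detect_os_simple_alt (ip : String) (nmap_results : List (String × List (String × List (Int × List (String × String))))) : String :=
  match nmap_results.lookup ip with
  | none => "Unknown"
  | some host =>
    match host.lookup "tcp" with
    | none => "Unknown"
    | some tcp =>
      match ranksB tcp with
      | none => "Unknown"          -- except KeyError: return "Unknown"
      | some ranks => osTableB.getD (pyMinD3 ranks) "Unknown"  -- minimum rank < 4 always, so indexing never raises

-- ===== PRECONDITION & SPEC =====
def Spec_detect_os_simple (ip : String) (nmap_results : List (String × List (String × List (Int × List (String × String))))) (out : String) : Prop := out = detect_os_simple_alt ip nmap_results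
instance (ip : String) (nmap_results : List (String × List (String × List (Int × List (String × String))))) (out : String) : Decidable (Spec_detect_os_simple ip nmap_results out) := by unfold Spec_detect_os_simple; infer_instance

-- ===== CLAIM (what is proved, stated in full; the proofs are below) =====
def Claim_equal_detect_os_simple : Prop := ∀ (ip : String) (nmap_results : List (String × List (String × List (Int × List (String × String))))), Dom_detect_os_simple ip nmap_results → Spec_detect_os_simple ip nmap_results (detect_os_simple ip nmap_results)

-- ===== LEMMAS AND PROOFS =====

-- A's classification of an open-port list, as a rank
def classifyN (ops : List Int) : Nat :=
  if ops.contains 135 || ops.contains 445 || ops.contains 3389 then 0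
  else if ops.contains 22 then 1
  else if ops.contains 23 then 2
  else 3

lemma rankOfB_eq (p : Int) :
    rankOfB p = if p == 135 || p == 445 || p == 3389 then 0
                else if p == 22 then 1 else if p == 23 then 2 else 3 := by
  simp only [rankOfB, rankTableB, List.lookup]
  cases hb1 : p == (135 : Int) <;> cases hb2 : p == (445 : Int) <;>
    cases hb3 : p == (3389 : Int) <;> cases hb4 : p == (22 : Int) <;>
    cases hb5 : p == (23 : Int) <;> simp_all

lemma rankOfB_le (p : Int) : rankOfB p ≤ 3 := by
  rw [rankOfB_eq]; split_ifs <;> omega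

lemma ranksB_eq (tcp : List (Int × List (String × String))) :
    ranksB tcp = (openPortsA tcp).map (List.map rankOfB) := by
  induction tcp with
  | nil => simp [ranksB, openPortsA]
  | cons hd tl ih =>
    obtain ⟨p, info⟩ := hd
    simp only [ranksB, openPortsA, ih]
    cases info.lookup "state" with
    | none => rfl
    | some s =>
      cases openPortsA tl with
      | none => rfl
      | some ops => by_cases hs : (s == "open") = true <;> simp [hs]

lemma classifyN_cons (p : Int) (rest : List Int) :
    classifyN (p :: rest) = min (rankOfB p) (classifyN rest) := by
  rw [rankOfB_eq]
  unfold classifyN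
  simp only [List.contains_cons, Bool.or_eq_true, beq_iff_eq]
  by_cases h1 : p = 135 <;> by_cases h2 : p = 445 <;> by_cases h3 : p = 3389 <;>
    by_cases h4 : p = 22 <;> by_cases h5 : p = 23 <;>
    simp_all [eq_comm] <;> split_ifs <;> omega

lemma foldl_min_ranks (ops : List Int) : ∀ a : Nat, a ≤ 3 →
    (ops.map rankOfB).foldl min a = min a (classifyN ops) := by
  induction ops with
  | nil => intro a ha; simp [classifyN]; omega
  | cons p rest ih =>
    intro a ha
    simp only [List.map, List.foldl]
    rw [ih (min a (rankOfB p)) (by have := rankOfB_le p; omega), classifyN_cons,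
      Nat.min_assoc]

lemma minD3_ranks (ops : List Int) : pyMinD3 (ops.map rankOfB) = classifyN ops := by
  cases ops with
  | nil => simp [pyMinD3, classifyN]
  | cons p rest =>
    simp only [List.map, pyMinD3]
    rw [foldl_min_ranks rest (rankOfB p) (rankOfB_le p), classifyN_cons]

-- ===== VERDICT =====
theorem detect_os_simple_spec : Claim_equal_detect_os_simple := by
  intro ip nmap_results _
  unfold Spec_detect_os_simple
  simp only [detect_os_simple, detect_os_simple_alt]
  cases nmap_results.lookup ip with
  | none => rfl
  | some host =>
    simp only []
    cases host.lookup "tcp" with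
    | none => rfl
    | some tcp =>
      simp only [ranksB_eq]
      cases openPortsA tcp with
      | none => rfl
      | some ops =>
        simp only [Option.map_some, minD3_ranks]
        unfold classifyN
        split_ifs <;> simp [osTableB]
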